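-- pv_equiv track=rewrite | github.com/leif-fin/DBM | badgenius/app.py | encode_answers
-- ===== SOURCE A (Python) =====
-- def encode_answers(answers):
--     multipleChoice = {'A': '00', 'B': '01', 'C': '10', 'D': '11'}
--     bit_string = ''.join([multipleChoice[answer] for answer in answers])
--     encoded = ''
--     for i in range(0, len(bit_string), 8):
--         encoded_char = chr(int(bit_string[i:i+8], 2))
--         encoded += encoded_char
--     return encoded
-- ===== SOURCE B (Python) =====
-- def encode_answers(answers):
--     # Same result, but no intermediate bit string: an integer accumulator packs
--     # 4 two-bit codes per output character; a trailing partial group is emitted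
--     # unpadded, exactly like int() on the leftover bits.
--     codes = {'A': 0, 'B': 1, 'C': 2, 'D': 3}
--     out = []
--     acc = 0
--     cnt = 0
--     for answer in answers:
--         acc = acc * 4 + codes[answer]
--         cnt += 1
--         if cnt == 4:
--             out.append(chr(acc))
--             acc = 0
--             cnt = 0
--     if cnt > 0:
--         out.append(chr(acc))
--     return ''.join(out)
-- ===== Notes on version B (the rewrite author's own statement) =====
-- stated objective: alternative
-- what changed: Replaces the intermediate bit-string plus 8-char slice/int(,2) parsing by a single pass that packs four 2-bit answer codes into an integer accumulator and emits one character per full (or trailing partial) group.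
import Mathlib
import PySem

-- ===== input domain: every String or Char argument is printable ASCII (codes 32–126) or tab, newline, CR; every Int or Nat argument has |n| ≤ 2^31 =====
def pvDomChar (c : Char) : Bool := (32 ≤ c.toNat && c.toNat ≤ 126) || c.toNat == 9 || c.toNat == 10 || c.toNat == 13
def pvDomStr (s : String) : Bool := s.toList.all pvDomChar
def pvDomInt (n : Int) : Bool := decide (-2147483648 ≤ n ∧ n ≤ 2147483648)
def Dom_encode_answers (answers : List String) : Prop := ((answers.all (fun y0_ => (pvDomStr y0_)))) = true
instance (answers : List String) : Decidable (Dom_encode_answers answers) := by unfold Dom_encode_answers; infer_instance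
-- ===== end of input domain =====

-- B packs four 2-bit answer codes into an integer accumulator per output character,
-- instead of building an intermediate bit string and parsing 8-char slices (objective: alternative).


-- ===== PORT A =====
-- multipleChoice = {'A': '00', 'B': '01', 'C': '10', 'D': '11'}
def pvMc : PySem.Dict String String :=
  PySem.Dict.ofList [("A", "00"), ("B", "01"), ("C", "10"), ("D", "11")]

-- bit_string = ''.join([multipleChoice[answer] for answer in answers])
-- (the KeyError on an answer outside the dict is excluded by Pre_; .getD "" is the total form of the lookup)
def pvBits (answers : List String) : List Char :=
  PySem.Chars.join [] (answers.map (fun answer => ((pvMc.get? answer).getD "").toList))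

-- for i in range(0, len(bit_string), 8): encoded += chr(int(bit_string[i:i+8], 2))
-- (int(s, 2) is PySem.Int.ofCharsBase? _ 2; under Pre_ each slice is a nonempty binary string, so it is `some`)
def pvLoopA (bits : List Char) (i : Nat) (encoded : List Char) : List Char :=
  if i < bits.length then
    pvLoopA bits (i + 8)
      (encoded ++ [Char.ofNat ((PySem.Int.ofCharsBase?
          (PySem.List.slice bits (some (i : Int)) (some ((i + 8 : Nat) : Int))) 2).getD 0).toNat])
  else encoded
termination_by bits.length - i

def encode_answers (answers : List String) : String :=
  String.ofList (pvLoopA (pvBits answers) 0 [])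

-- ===== PORT B =====
-- codes = {'A': 0, 'B': 1, 'C': 2, 'D': 3}
def pvCodes : PySem.Dict String Int :=
  PySem.Dict.ofList [("A", 0), ("B", 1), ("C", 2), ("D", 3)]

-- the single pass of Source B: acc = acc*4 + codes[answer]; one chr(acc) per 4 answers, then the unpadded leftover
def pvLoopB : List String → Int → Int → List Char → List Char
  | [], acc, cnt, out => if 0 < cnt then out ++ [Char.ofNat acc.toNat] else out
  | answer :: rest, acc, cnt, out =>
      let acc' := acc * 4 + (pvCodes.get? answer).getD 0
      let cnt' := cnt + 1
      if cnt' = 4 then pvLoopB rest 0 0 (out ++ [Char.ofNat acc'.toNat])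
      else pvLoopB rest acc' cnt' out

def encode_answers_alt (answers : List String) : String :=
  String.ofList (pvLoopB answers 0 0 [])

-- ===== PRECONDITION & SPEC =====
-- Pre_ excludes exactly the inputs on which A raises KeyError: an answer outside {'A','B','C','D'}.
def Pre_encode_answers (answers : List String) : Prop :=
  ∀ a ∈ answers, a = "A" ∨ a = "B" ∨ a = "C" ∨ a = "D"
instance (answers : List String) : Decidable (Pre_encode_answers answers) := by
  unfold Pre_encode_answers; infer_instance

def pvWitness_encode_answers : List String := ["A", "D", "C", "B", "B"]

def Spec_encode_answers (answers : List String) (out : String) : Prop := out = encode_answers_alt answers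
instance (answers : List String) (out : String) : Decidable (Spec_encode_answers answers out) := by unfold Spec_encode_answers; infer_instance

-- ===== CLAIM (what is proved, stated in full; the proofs are below) =====
def Claim_equal_encode_answers : Prop := ∀ (answers : List String), Dom_encode_answers answers → Pre_encode_answers answers → Spec_encode_answers answers (encode_answers answers)

-- ===== LEMMAS AND PROOFS =====

-- chr(int(cs, 2)) for the chunks A parses
def pvVal (cs : List Char) : Char :=
  Char.ofNat ((PySem.Int.ofCharsBase? cs 2).getD 0).toNat

-- the chunk recursion A's index loop performs: parse take 8, recurse on drop 8
def pvChunk : List Char → List Char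
  | [] => []
  | c1 :: c2 :: c3 :: c4 :: c5 :: c6 :: c7 :: c8 :: t =>
      pvVal [c1, c2, c3, c4, c5, c6, c7, c8] :: pvChunk t
  | cs => [pvVal cs]

theorem pvChunk_step (cs : List Char) (h : cs ≠ []) :
    pvChunk cs = pvVal (cs.take 8) :: pvChunk (cs.drop 8) := by
  match cs with
  | [] => exact absurd rfl h
  | [c1] => rfl
  | [c1, c2] => rfl
  | [c1, c2, c3] => rfl
  | [c1, c2, c3, c4] => rfl
  | [c1, c2, c3, c4, c5] => rfl
  | [c1, c2, c3, c4, c5, c6] => rfl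
  | [c1, c2, c3, c4, c5, c6, c7] => rfl
  | c1 :: c2 :: c3 :: c4 :: c5 :: c6 :: c7 :: c8 :: t => rfl

theorem pvChunk_append8 (P t : List Char) (hP : P.length = 8) :
    pvChunk (P ++ t) = pvVal P :: pvChunk t := by
  rcases P with _ | ⟨c1, _ | ⟨c2, _ | ⟨c3, _ | ⟨c4, _ | ⟨c5, _ | ⟨c6, _ | ⟨c7, _ | ⟨c8, r⟩⟩⟩⟩⟩⟩⟩⟩ <;>
    simp at hP
  subst hP
  rfl

theorem pvBits_nil : pvBits [] = [] := rfl

theorem pvBits_cons (a : String) (rest : List String) :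
    pvBits (a :: rest) = ((pvMc.get? a).getD "").toList ++ pvBits rest := by
  cases rest with
  | nil => simp [pvBits, PySem.Chars.join, List.intercalate]
  | cons b r =>
      simp only [pvBits, List.map_cons]
      rw [PySem.Chars.join_cons_cons]
      simp

theorem pvLoopB_append (answers : List String) (acc cnt : Int) (out : List Char) :
    pvLoopB answers acc cnt out = out ++ pvLoopB answers acc cnt [] := by
  induction answers generalizing acc cnt out with
  | nil => by_cases h : 0 < cnt <;> simp [pvLoopB, h]
  | cons a rest ih =>
      simp only [pvLoopB]
      by_cases h : cnt + 1 = 4 <;> simp only [h, if_pos, if_false]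
      · rw [ih _ _ (out ++ _), ih _ _ ([] ++ _)]
        simp
      · rw [ih, ih]

-- the value and length of the bit string of one full group of four answers
theorem pvQuad (a b c d : String)
    (ha : a = "A" ∨ a = "B" ∨ a = "C" ∨ a = "D")
    (hb : b = "A" ∨ b = "B" ∨ b = "C" ∨ b = "D")
    (hc : c = "A" ∨ c = "B" ∨ c = "C" ∨ c = "D")
    (hd : d = "A" ∨ d = "B" ∨ d = "C" ∨ d = "D") :
    pvVal (pvBits [a, b, c, d]) =
      Char.ofNat (((((0 : Int) * 4 + (pvCodes.get? a).getD 0) * 4 + (pvCodes.get? b).getD 0) * 4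
        + (pvCodes.get? c).getD 0) * 4 + (pvCodes.get? d).getD 0).toNat
      ∧ (pvBits [a, b, c, d]).length = 8 := by
  rcases ha with rfl | rfl | rfl | rfl <;> rcases hb with rfl | rfl | rfl | rfl <;>
    rcases hc with rfl | rfl | rfl | rfl <;> rcases hd with rfl | rfl | rfl | rfl <;> decide

theorem pvMain (answers : List String)
    (hpre : ∀ a ∈ answers, a = "A" ∨ a = "B" ∨ a = "C" ∨ a = "D") :
    pvLoopB answers 0 0 [] = pvChunk (pvBits answers) := by
  match answers with
  | [] => decide
  | [a] =>
      have ha := hpre a (by simp)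
      rcases ha with rfl | rfl | rfl | rfl <;> decide
  | [a, b] =>
      have ha := hpre a (by simp)
      have hb := hpre b (by simp)
      rcases ha with rfl | rfl | rfl | rfl <;> rcases hb with rfl | rfl | rfl | rfl <;> decide
  | [a, b, c] =>
      have ha := hpre a (by simp)
      have hb := hpre b (by simp)
      have hc := hpre c (by simp)
      rcases ha with rfl | rfl | rfl | rfl <;> rcases hb with rfl | rfl | rfl | rfl <;>
        rcases hc with rfl | rfl | rfl | rfl <;> decide
  | a :: b :: c :: d :: rest =>
      have ha := hpre a (by simp)
      have hb := hpre b (by simp)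
      have hc := hpre c (by simp)
      have hd := hpre d (by simp)
      have hrest : ∀ x ∈ rest, x = "A" ∨ x = "B" ∨ x = "C" ∨ x = "D" := by
        intro x hx; exact hpre x (by simp [hx])
      have key := pvMain rest hrest
      obtain ⟨hq, hlen⟩ := pvQuad a b c d ha hb hc hd
      have hsplit : pvBits (a :: b :: c :: d :: rest) = pvBits [a, b, c, d] ++ pvBits rest := by
        simp [pvBits_cons, pvBits_nil]
      rw [hsplit, pvChunk_append8 _ _ hlen, hq]
      simp only [pvLoopB]
      norm_num
      rw [pvLoopB_append, key]
      simp
termination_by answers.length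

theorem pvLoopA_eq_chunk (bits : List Char) (i : Nat) (enc : List Char) :
    pvLoopA bits i enc = enc ++ pvChunk (bits.drop i) := by
  by_cases h : i < bits.length
  · rw [pvLoopA]
    simp only [h, if_pos]
    rw [pvLoopA_eq_chunk bits (i + 8)]
    rw [PySem.List.slice_natCast]
    have hne : bits.drop i ≠ [] := by
      intro hn
      have hl := List.length_drop (l := bits) (i := i)
      rw [hn] at hl; simp at hl; omega
    rw [pvChunk_step (bits.drop i) hne]
    simp [List.drop_drop, List.take_drop, pvVal]
  · rw [pvLoopA]
    simp only [h, if_neg, not_false_iff]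
    have hd : bits.drop i = [] := List.drop_eq_nil_of_le (by omega)
    rw [hd]
    simp [pvChunk]
termination_by bits.length - i
decreasing_by omega

-- ===== VERDICT (by name: the statement is the Claim_ definition above) =====
theorem encode_answers_spec : Claim_equal_encode_answers := by
  intro answers _ hpre
  unfold Spec_encode_answers encode_answers encode_answers_alt
  rw [pvLoopA_eq_chunk, pvMain answers hpre]
  simp
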